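-- pv_equiv track=rewrite | github.com/Gnegnery/Projet-Bio | .ipynb_checkpoints/motifsSearch-checkpoint.py | removeLowComplexeHetero
-- ===== SOURCE A (Python) =====
-- def removeLowComplexeHetero(motifs:list, n:int, variation = "yes"):
--     """
--     Enlève les motifs peu complexe ayant n fois un dinucléotide
--     entrée motifs: liste de motifs, clé = motif, valeur = fréquence d'observation
--     entrée n: nombre di-nucleotides répétés dans un motif peu complexe
--     entrée variation : string, si "yes" permettre variation d'un nucléotide
--     sortie motifsClean: liste de motifs sans les motifs peu complexe
--     >>>removeLowComplexeHetero(['GGTTTGG', 'TGAGTTA', 'TGCCGTG', 'AGAGAGA', 'TCACCGA', 'TTGGTAT', 'AGGGTGG', 'TGGCTTA', 'AGAGTAG', 'GCCCCTC'], 3, variation = "yes")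
--     ['GGTTTGG', 'TGAGTTA', 'TGCCGTG', 'TCACCGA', 'TTGGTAT', 'TGGCTTA']
--
--     """
--     motifsClean = []
--     for mot in motifs:
--         freqNucs = {}
--         most = 0
--         d_nuc = 2
--         t_mot = len(mot)
--         lastNucs = ""
--         if variation == "yes":
--             for i in range(0, t_mot - d_nuc + 1):
--                 nucs = mot[i:i+d_nuc]
--                 if nucs in freqNucs:
--                     freqNucs[nucs] += 1
--
--                 else :
--                     freqNucs[nucs] = 1
--
--                 if freqNucs[nucs] > most:
--                     most = freqNucs[nucs]
--
--             if most < n: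
--                 motifsClean.append(mot)
--
--         else:
--             for shift in range(d_nuc):
--                 most = 0
--                 stop = False
--                 for i in range(shift, t_mot - d_nuc + 1, 2):
--                     nucs = mot[i:i+d_nuc]
--                     if lastNucs == nucs:
--                         most += 1
--                     else:
--                         most = 1
--
--                     lastNucs = nucs
--                     if most >= n:
--                         stop = True
--                         break
--
--                 if stop:
--                     break
--
--             if stop == False:
--                 motifsClean.append(mot)
--     return motifsClean
-- ===== SOURCE B (Python) =====
-- def _runs(xs):
--     """Split xs into maximal runs of equal consecutive elements (itertools.groupby-style)."""
--     if not xs: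
--         return []
--     k = 1
--     while k < len(xs) and xs[k] == xs[0]:
--         k += 1
--     return [xs[:k]] + _runs(xs[k:])
--
--
-- def removeLowComplexeHetero(motifs: list, n: int, variation="yes"):
--     clean = []
--     for mot in motifs:
--         dinucs = [mot[i:i + 2] for i in range(len(mot) - 1)]
--         if variation == "yes":
--             most = max([dinucs.count(x) for x in dinucs], default=0)
--             if most < n:
--                 clean.append(mot)
--         else:
--             if not any(len(r) >= n
--                        for sh in (0, 1)
--                        for r in _runs([mot[i:i + 2] for i in range(sh, len(mot) - 1, 2)])):
--                 clean.append(mot)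
--     return clean
-- ===== Notes on version B (the rewrite author's own statement) =====
-- stated objective: simpler
-- what changed: The 'yes' branch replaces the running dict-counter with its interleaved maximum tracker by a build-then-reduce pass (list of dinucleotide counts, then max with default 0); the else branch replaces the carried lastNucs/most scan with early break by splitting each phase's dinucleotide list into maximal runs (groupby-style) and testing whether any run reaches length n.
import Mathlib
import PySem

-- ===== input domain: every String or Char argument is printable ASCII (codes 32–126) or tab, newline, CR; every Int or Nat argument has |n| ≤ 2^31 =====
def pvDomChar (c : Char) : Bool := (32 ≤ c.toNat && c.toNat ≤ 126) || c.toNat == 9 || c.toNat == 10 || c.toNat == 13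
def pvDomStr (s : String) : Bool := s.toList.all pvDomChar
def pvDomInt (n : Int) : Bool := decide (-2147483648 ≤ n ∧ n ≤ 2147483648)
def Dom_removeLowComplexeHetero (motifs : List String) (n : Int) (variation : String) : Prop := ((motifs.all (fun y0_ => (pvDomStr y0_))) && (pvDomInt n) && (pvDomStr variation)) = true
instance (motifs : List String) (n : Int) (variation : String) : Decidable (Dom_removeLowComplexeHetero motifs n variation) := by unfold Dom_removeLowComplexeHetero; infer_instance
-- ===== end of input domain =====

-- B replaces A's running dict-counter / carried run-counter scans by a count-then-max pass
-- ("yes" branch) and a groupby-style run-splitting pass (else branch); objective: simpler.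

-- ===== PORT A =====

-- A's "yes"-branch inner loop: dict of dinucleotide frequencies plus running maximum `most`.
def pvAYes (mot : String) (idxs : List Int) (d : PySem.Dict String Int) (most : Int) : Int :=
  match idxs with
  | [] => most
  | i :: rest =>
    let nucs := PySem.Str.slice mot (some i) (some (i + 2))
    let d' := if d.contains nucs then d.insert nucs (d.getD nucs 0 + 1) else d.insert nucs 1
    let c := d'.getD nucs 0
    let most' := if most < c then c else most
    pvAYes mot rest d' most'

-- A's else-branch inner loop over one phase: (most, lastNucs, stop) with early break at most >= n.
def pvAPhase (mot : String) (n : Int) (idxs : List Int) (last : String) (most : Int) :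
    Int × String × Bool :=
  match idxs with
  | [] => (most, last, false)
  | i :: rest =>
    let nucs := PySem.Str.slice mot (some i) (some (i + 2))
    let most' := if last == nucs then most + 1 else 1
    if n ≤ most' then (most', nucs, true) else pvAPhase mot n rest nucs most'

-- A's else branch: shift = 0 then (unless stopped) shift = 1, lastNucs carried across; returns `stop`.
def pvAElse (mot : String) (n : Int) : Bool :=
  let t := PySem.Str.len mot
  let r0 := pvAPhase mot n (PySem.List.pyRange 0 (t - 1) 2) "" 0
  if r0.2.2 then true
  else (pvAPhase mot n (PySem.List.pyRange 1 (t - 1) 2) r0.2.1 0).2.2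

def removeLowComplexeHetero (motifs : List String) (n : Int) (variation : String) : List String :=
  motifs.foldl (fun motifsClean mot =>
    if variation == "yes" then
      let t := PySem.Str.len mot
      let most := pvAYes mot (PySem.List.pyRange 0 (t - 1) 1) PySem.Dict.empty 0
      if most < n then motifsClean ++ [mot] else motifsClean
    else
      if pvAElse mot n = false then motifsClean ++ [mot] else motifsClean) []

-- ===== PORT B =====

-- Source B's _runs: split a list into maximal runs of equal consecutive elements.
def pvRuns (xs : List String) : List (List String) :=
  match xs with
  | [] => []
  | x :: rest =>
    (x :: rest.takeWhile (fun y => x == y)) :: pvRuns (rest.dropWhile (fun y => x == y))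
termination_by xs.length
decreasing_by simp; exact List.length_dropWhile_le _ _

-- [mot[i:i+2] for i in range(sh, len(mot)-1, 2)]
def pvPhaseDinucs (mot : String) (sh : Int) : List String :=
  (PySem.List.pyRange sh (PySem.Str.len mot - 1) 2).map
    (fun i => PySem.Str.slice mot (some i) (some (i + 2)))

def removeLowComplexeHetero_alt (motifs : List String) (n : Int) (variation : String) : List String :=
  motifs.foldl (fun clean mot =>
    if variation == "yes" then
      let dinucs := (PySem.List.pyRange 0 (PySem.Str.len mot - 1) 1).map
        (fun i => PySem.Str.slice mot (some i) (some (i + 2)))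
      -- max([dinucs.count(x) for x in dinucs], default=0)
      let most := (PySem.List.max? (dinucs.map (fun x => (PySem.List.count dinucs x : Int)))
        (fun v => v)).getD 0
      if most < n then clean ++ [mot] else clean
    else
      if ([(0 : Int), 1].any (fun sh =>
            (pvRuns (pvPhaseDinucs mot sh)).any (fun r => decide (n ≤ (r.length : Int))))) then
        clean
      else clean ++ [mot]) []

-- ===== PRECONDITION & SPEC =====
def Spec_removeLowComplexeHetero (motifs : List String) (n : Int) (variation : String) (out : List String) : Prop := out = removeLowComplexeHetero_alt motifs n variation
instance (motifs : List String) (n : Int) (variation : String) (out : List String) : Decidable (Spec_removeLowComplexeHetero motifs n variation out) := by unfold Spec_removeLowComplexeHetero; infer_instance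

-- ===== CLAIM (what is proved, stated in full; the proofs are below) =====
def Claim_equal_removeLowComplexeHetero : Prop := ∀ (motifs : List String) (n : Int) (variation : String), Dom_removeLowComplexeHetero motifs n variation → Spec_removeLowComplexeHetero motifs n variation (removeLowComplexeHetero motifs n variation)

-- ===== LEMMAS AND PROOFS =====

-- generic forms of A's loops over the already-sliced dinucleotide list
def pvYesCore (l : List String) (d : PySem.Dict String Int) (most : Int) : Int :=
  match l with
  | [] => most
  | nucs :: rest =>
    let d' := if d.contains nucs then d.insert nucs (d.getD nucs 0 + 1) else d.insert nucs 1
    let c := d'.getD nucs 0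
    let most' := if most < c then c else most
    pvYesCore rest d' most'

def pvPhaseCore (n : Int) (l : List String) (last : String) (most : Int) : Int × String × Bool :=
  match l with
  | [] => (most, last, false)
  | nucs :: rest =>
    let most' := if last == nucs then most + 1 else 1
    if n ≤ most' then (most', nucs, true) else pvPhaseCore n rest nucs most'

lemma pvAYes_eq_core (mot : String) (idxs : List Int) (d : PySem.Dict String Int) (most : Int) :
    pvAYes mot idxs d most =
      pvYesCore (idxs.map (fun i => PySem.Str.slice mot (some i) (some (i + 2)))) d most := by
  induction idxs generalizing d most with
  | nil => rfl
  | cons i rest ih => simp only [pvAYes, pvYesCore, List.map_cons]; exact ih _ _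

lemma pvAPhase_eq_core (mot : String) (n : Int) (idxs : List Int) (last : String) (most : Int) :
    pvAPhase mot n idxs last most =
      pvPhaseCore n (idxs.map (fun i => PySem.Str.slice mot (some i) (some (i + 2)))) last most := by
  induction idxs generalizing last most with
  | nil => rfl
  | cons i rest ih =>
    simp only [pvAPhase, pvPhaseCore, List.map_cons]
    split <;> simp [ih]

-- ===== the "yes" branch: pvYesCore computes the maximal dinucleotide count =====

lemma pvYesCore_inv (l : List String) : ∀ (pre : List String) (d : PySem.Dict String Int) (most : Int),
    (∀ x, d.getD x 0 = (pre.count x : Int)) →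
    (∀ x ∈ pre, (pre.count x : Int) ≤ most) →
    (most = 0 ∨ ∃ x ∈ pre, ((pre.count x : Int) = most)) →
    (∀ x ∈ pre ++ l, (((pre ++ l).count x : Int) ≤ pvYesCore l d most)) ∧
      (pvYesCore l d most = 0 ∨
        ∃ x ∈ pre ++ l, (((pre ++ l).count x : Int) = pvYesCore l d most)) := by
  induction l with
  | nil => intro pre d most _ h2 h3; simp [pvYesCore]; exact ⟨h2, h3⟩
  | cons a rest ih =>
    intro pre d most h1 h2 h3
    have hd' : (if d.contains a then d.insert a (d.getD a 0 + 1) else d.insert a 1)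
        = d.insert a ((pre.count a : Int) + 1) := by
      by_cases hc : d.contains a = true
      · simp [hc, h1 a]
      · have hc' : d.contains a = false := by simpa using hc
        have := PySem.Dict.getD_of_not_contains d (0 : Int) hc'
        have hcount : (pre.count a : Int) = 0 := by rw [← h1 a, this]
        simp [hc', hcount]
    have hcstep : (d.insert a ((pre.count a : Int) + 1)).getD a 0 = (pre.count a : Int) + 1 := by
      simp
    -- the new dict counts pre ++ [a]
    have h1' : ∀ x, (d.insert a ((pre.count a : Int) + 1)).getD x 0 = (((pre ++ [a]).count x : Int)) := by
      intro x
      rw [PySem.Dict.getD_insert]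
      by_cases hx : x = a
      · subst hx; simp [List.count_append]
      · have : ([a].count x) = 0 := by
          simp [Ne.symm hx]
        simp [hx, h1 x, List.count_append, this]
    set c : Int := (pre.count a : Int) + 1 with hc
    set most' : Int := if most < c then c else most with hmost'
    have h2' : ∀ x ∈ pre ++ [a], (((pre ++ [a]).count x : Int) ≤ most') := by
      intro x hx
      by_cases hxa : x = a
      · subst hxa
        have : ((pre ++ [x]).count x : Int) = c := by simp [List.count_append, hc]
        rw [this, hmost']
        split <;> omega
      · have hxpre : x ∈ pre := by
          rcases List.mem_append.mp hx with h | h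
          · exact h
          · simp at h; exact absurd h hxa
        have : ((pre ++ [a]).count x : Int) = (pre.count x : Int) := by
          have : ([a].count x) = 0 := by simp [Ne.symm hxa]
          simp [List.count_append, this]
        rw [this, hmost']
        have := h2 x hxpre
        split <;> omega
    have h3' : most' = 0 ∨ ∃ x ∈ pre ++ [a], (((pre ++ [a]).count x : Int) = most') := by
      by_cases hlt : most < c
      · right
        refine ⟨a, by simp, ?_⟩
        have : ((pre ++ [a]).count a : Int) = c := by simp [List.count_append, hc]
        rw [this, hmost']; simp [hlt]
      · have hm' : most' = most := by rw [hmost']; simp [hlt]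
        rcases h3 with h0 | ⟨x, hxpre, hxc⟩
        · left; omega
        · right
          have hxa : x ≠ a := by
            intro h; subst h
            have : c = most + 1 := by omega
            omega
          refine ⟨x, List.mem_append.mpr (Or.inl hxpre), ?_⟩
          have : ([a].count x) = 0 := by simp [Ne.symm hxa]
          simp [List.count_append, this]
          omega
    have := ih (pre ++ [a]) _ most' h1' h2' h3'
    simp only [pvYesCore]
    rw [hd']
    simp only [hcstep, ← hmost']
    simpa [List.append_assoc] using this

lemma count_pos_of_mem {x : String} {l : List String} (h : x ∈ l) : 0 < (l.count x : Int) := by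
  exact_mod_cast List.count_pos_iff.mpr h

-- A's "yes" most equals B's count-then-max value
lemma yes_branch_eq (ds : List String) :
    pvYesCore ds PySem.Dict.empty 0 =
      (PySem.List.max? (ds.map (fun x => (PySem.List.count ds x : Int))) (fun v => v)).getD 0 := by
  have hspec := pvYesCore_inv ds [] PySem.Dict.empty 0
    (by intro x; simp [PySem.Dict.getD_empty]) (by simp) (Or.inl rfl)
  simp only [List.nil_append] at hspec
  obtain ⟨hub, hatt⟩ := hspec
  set M : Int := pvYesCore ds PySem.Dict.empty 0 with hM
  cases hmax : PySem.List.max? (ds.map (fun x => (PySem.List.count ds x : Int))) (fun v => v) with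
  | none =>
    have hnil : ds = [] := by
      have := (PySem.List.max?_eq_none_iff (ds.map (fun x => (PySem.List.count ds x : Int)))
        (fun v => v)).mp hmax
      simpa using this
    subst hnil
    rcases hatt with h0 | ⟨x, hx, _⟩
    · simpa using h0
    · simp at hx
  | some m =>
    have hmem := PySem.List.max?_mem hmax
    obtain ⟨x, hx, hxm⟩ := List.mem_map.mp hmem
    have hcount : (PySem.List.count ds x : Int) = (ds.count x : Int) := by
      simp [PySem.List.count]
    have hmM : m ≤ M := by rw [← hxm, hcount]; exact hub x hx
    have hMm : M ≤ m := by
      rcases hatt with h0 | ⟨y, hy, hyM⟩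
      · have := count_pos_of_mem hx
        omega
      · have := PySem.List.max?_isMax hmax ((ds.count y : Int))
          (List.mem_map.mpr ⟨y, hy, by simp [PySem.List.count]⟩)
        simpa [hyM] using this
    have : M = m := le_antisymm hMm hmM
    simp [this]

-- ===== the else branch: the carried scan equals the run decomposition =====

lemma pvRuns_nil : pvRuns [] = [] := by unfold pvRuns; rfl

lemma pvRuns_cons (x : String) (rest : List String) :
    pvRuns (x :: rest) =
      (x :: rest.takeWhile (fun y => x == y)) :: pvRuns (rest.dropWhile (fun y => x == y)) := by
  rw [pvRuns]

lemma pvPhaseCore_scan (n : Int) (l : List String) : ∀ (x : String) (m : Int), 1 ≤ m → ¬ n ≤ m →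
    (pvPhaseCore n l x m).2.2 =
      (decide (n ≤ m + ((l.takeWhile (fun y => x == y)).length : Int)) ||
        (pvRuns (l.dropWhile (fun y => x == y))).any (fun r => decide (n ≤ (r.length : Int)))) := by
  induction l with
  | nil =>
    intro x m _ hn
    simp [pvPhaseCore, pvRuns_nil, hn]
  | cons a rest ih =>
    intro x m hm hn
    by_cases hbeq : (x == a) = true
    · have hxa : x = a := by simpa using hbeq
      subst hxa
      simp only [pvPhaseCore, beq_self_eq_true, if_true, List.takeWhile_cons,
        List.dropWhile_cons, List.length_cons]
      by_cases hstop : n ≤ m + 1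
      · rw [if_pos hstop]
        have h0 : (0 : Int) ≤ ((rest.takeWhile (fun y => x == y)).length : Int) := by positivity
        have h2 : n ≤ m + (((rest.takeWhile (fun y => x == y)).length : Int) + 1) := by omega
        simp [h2]
      · rw [if_neg hstop, ih x (m + 1) (by omega) hstop]
        have harith : (m + 1) + ((rest.takeWhile (fun y => x == y)).length : Int)
            = m + (((rest.takeWhile (fun y => x == y)).length + 1 : Nat) : Int) := by
          push_cast; ring
        rw [harith]
    · have hbf : (x == a) = false := by simpa using hbeq
      simp only [pvPhaseCore, List.takeWhile_cons, List.dropWhile_cons, hbf,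
        Bool.false_eq_true, if_false, List.length_nil, Nat.cast_zero, add_zero]
      by_cases hstop : n ≤ (1 : Int)
      · rw [if_pos hstop]
        simp only [pvRuns_cons, List.any_cons, List.length_cons]
        have h0 : (0 : Int) ≤ ((rest.takeWhile (fun y => a == y)).length : Int) := by positivity
        have h2 : n ≤ ((rest.takeWhile (fun y => a == y)).length : Int) + 1 := by omega
        simp [h2, hn]
      · rw [if_neg hstop, ih a 1 (by omega) hstop]
        simp only [pvRuns_cons, List.any_cons, List.length_cons, hn, decide_false,
          Bool.false_or]
        have harith : (1 : Int) + ((rest.takeWhile (fun y => a == y)).length : Int)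
            = (((rest.takeWhile (fun y => a == y)).length + 1 : Nat) : Int) := by
          push_cast; ring
        rw [harith]
        rfl

-- the initial lastNucs is irrelevant from most = 0: the first step yields most = 1 either way
lemma pvPhaseCore_start (n : Int) (l : List String) (last : String) :
    (pvPhaseCore n l last 0).2.2 = (pvRuns l).any (fun r => decide (n ≤ (r.length : Int))) := by
  cases l with
  | nil => simp [pvPhaseCore, pvRuns_nil]
  | cons a rest =>
    have hfirst : (if (last == a) then (0 : Int) + 1 else 1) = 1 := by split <;> ring
    simp only [pvPhaseCore, hfirst]
    by_cases hstop : n ≤ (1 : Int)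
    · have h0 : (0 : Int) ≤ ((rest.takeWhile (fun y => a == y)).length : Int) := by positivity
      have h2 : n ≤ ((rest.takeWhile (fun y => a == y)).length : Int) + 1 := by omega
      simp [hstop, pvRuns_cons, h2]
    · rw [if_neg hstop, pvPhaseCore_scan n rest a 1 (by omega) hstop]
      simp only [pvRuns_cons, List.any_cons, List.length_cons]
      have harith : (1 : Int) + ((rest.takeWhile (fun y => a == y)).length : Int)
          = (((rest.takeWhile (fun y => a == y)).length + 1 : Nat) : Int) := by
        push_cast; ring
      rw [harith]
      rfl

-- A's else branch (with its cross-shift lastNucs carry-over) equals B's two-phase run test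
lemma else_branch_eq (mot : String) (n : Int) :
    pvAElse mot n = ([(0 : Int), 1].any (fun sh =>
      (pvRuns (pvPhaseDinucs mot sh)).any (fun r => decide (n ≤ (r.length : Int))))) := by
  unfold pvAElse
  dsimp only
  rw [pvAPhase_eq_core, pvAPhase_eq_core]
  rw [pvPhaseCore_start, pvPhaseCore_start]
  simp only [List.any_cons, List.any_nil, Bool.or_false, pvPhaseDinucs]
  split <;> simp_all

-- ===== VERDICT (by name: the statement is the Claim_ definition above) =====
theorem removeLowComplexeHetero_spec : Claim_equal_removeLowComplexeHetero := by
  unfold Claim_equal_removeLowComplexeHetero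
  intro motifs n variation _
  unfold Spec_removeLowComplexeHetero removeLowComplexeHetero removeLowComplexeHetero_alt
  apply PySem.List.foldl_congr_mem
  intro acc mot _
  by_cases hv : (variation == "yes") = true
  · simp only [hv, if_true]
    rw [pvAYes_eq_core, yes_branch_eq]
  · simp only [Bool.not_eq_true] at hv
    simp only [hv, Bool.false_eq_true, if_false]
    rw [else_branch_eq]
    cases h : ([(0 : Int), 1].any (fun sh =>
      (pvRuns (pvPhaseDinucs mot sh)).any (fun r => decide (n ≤ (r.length : Int))))) <;> simp
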